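-- pv_equiv track=rewrite | github.com/jaaaana/vi_proekt | gpt.py | find_optimal_swaps
-- ===== SOURCE A (Python) =====
-- def find_optimal_swaps(grid, solution, correct_positions):
--     """
--     Finds all optimal swaps, where both swapped letters end up in the correct position.
--     """
--     swaps = []
--     for i1 in range(5):
--         for j1 in range(5):
--             if correct_positions[i1][j1]:
--                 continue
--             for i2 in range(5):
--                 for j2 in range(5):
--                     if (i1, j1) == (i2, j2) or correct_positions[i2][j2]:
--                         continue
--                     # Check if swapping makes both letters correct
--                     if (
--                             grid[i1][j1] == solution[i2][j2]
--                             and grid[i2][j2] == solution[i1][j1]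
--                     ):
--                         swaps.append((i1, j1, i2, j2))
--     return swaps
-- ===== SOURCE B (Python) =====
-- def find_optimal_swaps(grid, solution, correct_positions):
--     """
--     Finds all optimal swaps, where both swapped letters end up in the correct position.
--     Indexes misplaced cells by their (current, wanted) letter pair, then emits each
--     misplaced cell's partners by one dict lookup instead of rescanning the grid.
--     """
--     misplaced = []
--     for i in range(5):
--         for j in range(5):
--             if not correct_positions[i][j]:
--                 misplaced.append((i, j, grid[i][j], solution[i][j]))
--     buckets = {}
--     for (i, j, g, s) in misplaced:
--         buckets.setdefault((g, s), []).append((i, j))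
--     swaps = []
--     for (i, j, g, s) in misplaced:
--         for (qi, qj) in buckets.get((s, g), []):
--             if (qi, qj) != (i, j):
--                 swaps.append((i, j, qi, qj))
--     return swaps
-- ===== Notes on version B (the rewrite author's own statement) =====
-- stated objective: alternative
-- what changed: Instead of a 4-deep rescan of all 25 cells for every misplaced cell, B collects the misplaced cells once, groups them in a dict keyed by their (current, wanted) letter pair, and emits each cell's swap partners by a single reverse-key lookup.
import Mathlib
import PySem

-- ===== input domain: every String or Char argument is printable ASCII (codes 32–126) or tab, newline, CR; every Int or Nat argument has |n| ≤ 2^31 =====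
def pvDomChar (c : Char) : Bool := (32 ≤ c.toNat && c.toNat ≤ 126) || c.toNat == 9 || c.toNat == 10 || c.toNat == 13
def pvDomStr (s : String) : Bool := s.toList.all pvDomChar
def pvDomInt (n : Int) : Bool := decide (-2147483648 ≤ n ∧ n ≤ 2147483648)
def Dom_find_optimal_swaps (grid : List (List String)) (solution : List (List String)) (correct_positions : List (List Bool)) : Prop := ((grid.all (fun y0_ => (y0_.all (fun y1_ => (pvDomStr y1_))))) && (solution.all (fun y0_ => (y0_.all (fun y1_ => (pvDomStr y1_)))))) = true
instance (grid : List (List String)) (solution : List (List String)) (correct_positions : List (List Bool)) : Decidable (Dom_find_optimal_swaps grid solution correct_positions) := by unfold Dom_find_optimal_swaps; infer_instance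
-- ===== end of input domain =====

-- B replaces A's 4-deep rescan of all 25 cells per misplaced cell by one pass collecting the
-- misplaced cells and a dict keyed by the (current, wanted) letter pair, queried on the reverse key.

-- ===== PORT A =====
def find_optimal_swaps (grid : List (List String)) (solution : List (List String)) (correct_positions : List (List Bool)) : List (Int × Int × Int × Int) :=
  (PySem.List.pyRange 0 5 1).foldl (fun swaps i1 =>
    (PySem.List.pyRange 0 5 1).foldl (fun swaps j1 =>
      if PySem.List.pyGetD (PySem.List.pyGetD correct_positions i1 []) j1 false then swaps
      else
        (PySem.List.pyRange 0 5 1).foldl (fun swaps i2 =>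
          (PySem.List.pyRange 0 5 1).foldl (fun swaps j2 =>
            if ((i1, j1) == (i2, j2)) || PySem.List.pyGetD (PySem.List.pyGetD correct_positions i2 []) j2 false then swaps
            else if (PySem.List.pyGetD (PySem.List.pyGetD grid i1 []) j1 "" == PySem.List.pyGetD (PySem.List.pyGetD solution i2 []) j2 "")
                    && (PySem.List.pyGetD (PySem.List.pyGetD grid i2 []) j2 "" == PySem.List.pyGetD (PySem.List.pyGetD solution i1 []) j1 "") then
              swaps ++ [(i1, j1, i2, j2)]
            else swaps) swaps) swaps) swaps) []

-- ===== PORT B =====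
def find_optimal_swaps_alt (grid : List (List String)) (solution : List (List String)) (correct_positions : List (List Bool)) : List (Int × Int × Int × Int) :=
  let misplaced : List (Int × Int × String × String) :=
    (PySem.List.pyRange 0 5 1).foldl (fun acc i =>
      (PySem.List.pyRange 0 5 1).foldl (fun acc j =>
        if !PySem.List.pyGetD (PySem.List.pyGetD correct_positions i []) j false then
          acc ++ [(i, j, PySem.List.pyGetD (PySem.List.pyGetD grid i []) j "",
                   PySem.List.pyGetD (PySem.List.pyGetD solution i []) j "")]
        else acc) acc) []
  let buckets : PySem.Dict (String × String) (List (Int × Int)) :=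
    misplaced.foldl (fun d e => d.modify (e.2.2.1, e.2.2.2) [] (· ++ [(e.1, e.2.1)])) PySem.Dict.empty
  misplaced.foldl (fun swaps e =>
    (buckets.getD (e.2.2.2, e.2.2.1) []).foldl (fun swaps q =>
      if (q.1, q.2) != (e.1, e.2.1) then swaps ++ [(e.1, e.2.1, q.1, q.2)] else swaps) swaps) []

-- ===== PRECONDITION & SPEC =====
-- Pre_ requires all three arguments to be at least a 5×5 table: on shorter inputs the indexing
-- raises IndexError in A or in B (B's single collection pass reads grid/solution at every
-- misplaced cell, so it raises on some short inputs where A's short-circuit skips the reads and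
-- returns; see the cite in claim.json). The proved equality itself holds unconditionally on the
-- ports, so the proof does not consume the Pre_ hypothesis.
def Pre_find_optimal_swaps (grid : List (List String)) (solution : List (List String)) (correct_positions : List (List Bool)) : Prop :=
  5 ≤ grid.length ∧ 5 ≤ solution.length ∧ 5 ≤ correct_positions.length ∧
  (grid.take 5).all (fun r => 5 ≤ r.length) ∧ (solution.take 5).all (fun r => 5 ≤ r.length) ∧
  (correct_positions.take 5).all (fun r => 5 ≤ r.length)
instance (grid : List (List String)) (solution : List (List String)) (correct_positions : List (List Bool)) : Decidable (Pre_find_optimal_swaps grid solution correct_positions) := by unfold Pre_find_optimal_swaps; infer_instance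

def pvWitness_find_optimal_swaps : List (List String) × List (List String) × List (List Bool) :=
  ([["a","b","c","d","e"],["b","a","c","d","e"],["a","b","c","d","e"],["a","b","c","d","e"],["a","b","c","d","e"]],
   [["b","a","c","d","e"],["a","b","c","d","e"],["a","b","c","d","e"],["a","b","c","d","e"],["a","b","c","d","e"]],
   [[false,false,true,true,true],[false,false,true,true,true],[true,true,true,true,true],[true,true,true,true,true],[true,true,true,true,true]])

def Spec_find_optimal_swaps (grid : List (List String)) (solution : List (List String)) (correct_positions : List (List Bool)) (out : List (Int × Int × Int × Int)) : Prop := out = find_optimal_swaps_alt grid solution correct_positions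
instance (grid : List (List String)) (solution : List (List String)) (correct_positions : List (List Bool)) (out : List (Int × Int × Int × Int)) : Decidable (Spec_find_optimal_swaps grid solution correct_positions out) := by unfold Spec_find_optimal_swaps; infer_instance

-- ===== CLAIM (what is proved, stated in full; the proofs are below) =====
def Claim_equal_find_optimal_swaps : Prop := ∀ (grid : List (List String)) (solution : List (List String)) (correct_positions : List (List Bool)), Dom_find_optimal_swaps grid solution correct_positions → Pre_find_optimal_swaps grid solution correct_positions → Spec_find_optimal_swaps grid solution correct_positions (find_optimal_swaps grid solution correct_positions)

-- ===== LEMMAS AND PROOFS =====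
-- generic loop/list shape lemmas specific to the shapes of these two programs
lemma pv_if_push {α : Type} (c1 c2 : Bool) (acc : List α) (t : α) :
    (if c1 then acc else if c2 then acc ++ [t] else acc) = acc ++ (if c1 then [] else if c2 then [t] else []) := by
  cases c1 <;> cases c2 <;> simp

lemma pv_if_push2 {α : Type} (c : Bool) (acc X : List α) :
    (if c then acc else acc ++ X) = acc ++ (if c then [] else X) := by
  cases c <;> simp

lemma pv_filter_map_eq_flatMap {α β : Type} (l : List α) (p : α → Bool) (f : α → β) :
    ((l.filter p).map f) = l.flatMap (fun x => if p x then [f x] else []) := by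
  induction l with
  | nil => rfl
  | cons x xs ih => by_cases h : p x <;> simp [h, ih]

-- abbreviations for the shared cell accessors and B's misplaced list
def pvR : List Int := PySem.List.pyRange 0 5 1
def pvC (c : List (List Bool)) (i j : Int) : Bool := PySem.List.pyGetD (PySem.List.pyGetD c i []) j false
def pvG (g : List (List String)) (i j : Int) : String := PySem.List.pyGetD (PySem.List.pyGetD g i []) j ""
def pvAnn (g s : List (List String)) (i j : Int) : Int × Int × String × String := (i, j, pvG g i j, pvG s i j)
def pvM (g s : List (List String)) (c : List (List Bool)) : List (Int × Int × String × String) :=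
  pvR.flatMap (fun i => ((pvR.filter (fun j => !pvC c i j)).map (fun j => pvAnn g s i j)))
def pvInnerA (g s : List (List String)) (c : List (List Bool)) (i1 j1 : Int) : List (Int × Int × Int × Int) :=
  pvR.flatMap (fun i2 => pvR.flatMap (fun j2 =>
    if ((i1, j1) == (i2, j2)) || pvC c i2 j2 then []
    else if (pvG g i1 j1 == pvG s i2 j2) && (pvG g i2 j2 == pvG s i1 j1) then [(i1, j1, i2, j2)] else []))

lemma pv_M_flatMap {β : Type} (g s : List (List String)) (c : List (List Bool))
    (h : (Int × Int × String × String) → List β) :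
    (pvM g s c).flatMap h
    = pvR.flatMap (fun i => pvR.flatMap (fun j => if !pvC c i j then h (pvAnn g s i j) else [])) := by
  unfold pvM
  rw [List.flatMap_assoc]
  refine List.flatMap_congr (fun i _ => ?_)
  rw [pv_filter_map_eq_flatMap, List.flatMap_assoc]
  refine List.flatMap_congr (fun j _ => ?_)
  by_cases hb : pvC c i j <;> simp [hb]

lemma pv_A_norm (g s : List (List String)) (c : List (List Bool)) :
    find_optimal_swaps g s c
    = pvR.flatMap (fun i1 => pvR.flatMap (fun j1 =>
        if pvC c i1 j1 then [] else pvInnerA g s c i1 j1)) := by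
  unfold find_optimal_swaps pvInnerA pvR pvC pvG
  simp only [pv_if_push, PySem.List.foldl_append_eq_flatMap, pv_if_push2, List.nil_append]

lemma pv_M_norm (g s : List (List String)) (c : List (List Bool)) :
    ((PySem.List.pyRange 0 5 1).foldl (fun acc i =>
      (PySem.List.pyRange 0 5 1).foldl (fun acc j =>
        if !PySem.List.pyGetD (PySem.List.pyGetD c i []) j false then
          acc ++ [(i, j, PySem.List.pyGetD (PySem.List.pyGetD g i []) j "",
                   PySem.List.pyGetD (PySem.List.pyGetD s i []) j "")]
        else acc) acc) ([] : List (Int × Int × String × String))) = pvM g s c := by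
  unfold pvM pvR pvAnn pvC pvG
  simp only [PySem.List.foldl_append_if, PySem.List.foldl_append_eq_flatMap, List.nil_append]

lemma pv_bucket (M : List (Int × Int × String × String)) (k : String × String) :
    ((M.foldl (fun d e => d.modify (e.2.2.1, e.2.2.2) [] (· ++ [(e.1, e.2.1)])) PySem.Dict.empty).getD k [])
    = (M.filter (fun e => (e.2.2.1, e.2.2.2) == k)).map (fun e => (e.1, e.2.1)) := by
  rw [show (M.foldl (fun d e => d.modify (e.2.2.1, e.2.2.2) [] (· ++ [(e.1, e.2.1)])) PySem.Dict.empty)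
      = ((M.map (fun e => ((e.2.2.1, e.2.2.2), (e.1, e.2.1)))).foldl (fun d p => d.modify p.1 [] (· ++ [p.2])) PySem.Dict.empty) by
    rw [List.foldl_map]]
  rw [PySem.Dict.getD_foldl_modify_append]
  simp [List.filter_map, Function.comp_def]

lemma pv_B_norm (g s : List (List String)) (c : List (List Bool)) :
    find_optimal_swaps_alt g s c
    = (pvM g s c).flatMap (fun e =>
        ((((pvM g s c).filter (fun q => (q.2.2.1, q.2.2.2) == (e.2.2.2, e.2.2.1))).map (fun q => (q.1, q.2.1))).filter
            (fun q => (q.1, q.2) != (e.1, e.2.1))).map (fun q => (e.1, e.2.1, q.1, q.2))) := by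
  simp only [find_optimal_swaps_alt]
  rw [pv_M_norm]
  simp only [pv_bucket]
  simp only [PySem.List.foldl_append_if, PySem.List.foldl_append_eq_flatMap, List.nil_append]

lemma pv_inner (g s : List (List String)) (c : List (List Bool)) (i1 j1 : Int) :
    pvInnerA g s c i1 j1
    = ((((pvM g s c).filter (fun q => (q.2.2.1, q.2.2.2) == (pvG s i1 j1, pvG g i1 j1))).map (fun q => (q.1, q.2.1))).filter
        (fun q => (q.1, q.2) != (i1, j1))).map (fun q => (i1, j1, q.1, q.2)) := by
  rw [List.filter_map, List.map_map, List.filter_filter, pv_filter_map_eq_flatMap, pv_M_flatMap]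
  unfold pvInnerA
  refine List.flatMap_congr (fun i2 _ => List.flatMap_congr (fun j2 _ => ?_))
  simp only [pvAnn, Function.comp_def]
  cases pvC c i2 j2
  · simp only [Bool.or_false, Bool.not_false, if_true, beq_iff_eq, Prod.mk.injEq]
    split_ifs <;> simp_all [Prod.ext_iff]
  · simp

lemma pv_main (g s : List (List String)) (c : List (List Bool)) :
    find_optimal_swaps g s c = find_optimal_swaps_alt g s c := by
  rw [pv_A_norm, pv_B_norm]
  have hA2 : (pvR.flatMap (fun i1 => pvR.flatMap (fun j1 =>
        if pvC c i1 j1 then [] else pvInnerA g s c i1 j1)))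
      = (pvM g s c).flatMap (fun e => pvInnerA g s c e.1 e.2.1) := by
    rw [pv_M_flatMap]
    refine List.flatMap_congr (fun i _ => List.flatMap_congr (fun j _ => ?_))
    cases pvC c i j <;> simp [pvAnn]
  rw [hA2]
  refine List.flatMap_congr (fun e he => ?_)
  simp only [pvM, List.mem_flatMap, List.mem_map, List.mem_filter] at he
  obtain ⟨i, hi, j, hj, rfl⟩ := he
  simp only [pvAnn]
  exact pv_inner g s c i j

-- ===== VERDICT (by name: the statement is the Claim_ definition above) =====
theorem find_optimal_swaps_spec : Claim_equal_find_optimal_swaps := by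
  intro grid solution correct_positions _ _
  exact pv_main grid solution correct_positions
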